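-- pv_equiv track=rewrite | github.com/KineBergseth/info135-22 | lab/lab7.py | truncation_hash
-- ===== SOURCE A (Python) =====
-- def truncation_hash(key):
--     key_to_string = str(key)
--     hash_value = ""
--     count = 1
--     for char in key_to_string:
--         if count % 3 == 0 or count % 5 == 0:
--             hash_value += char
--         count += 1
--     return hash_value
-- ===== SOURCE B (Python) =====
-- def truncation_hash(key):
--     s = str(key)
--     n = len(s)
--     idx = sorted(set(range(2, n, 3)) | set(range(4, n, 5)))
--     return ''.join(s[i] for i in idx)
-- ===== Notes on version B (the rewrite author's own statement) =====
-- stated objective: alternative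
-- what changed: Instead of scanning every character with a 1-based counter and divisibility tests, B computes the selected 0-based positions directly as the sorted union of the two arithmetic strides range(2,n,3) and range(4,n,5) and joins the characters at those indices.
import Mathlib
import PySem

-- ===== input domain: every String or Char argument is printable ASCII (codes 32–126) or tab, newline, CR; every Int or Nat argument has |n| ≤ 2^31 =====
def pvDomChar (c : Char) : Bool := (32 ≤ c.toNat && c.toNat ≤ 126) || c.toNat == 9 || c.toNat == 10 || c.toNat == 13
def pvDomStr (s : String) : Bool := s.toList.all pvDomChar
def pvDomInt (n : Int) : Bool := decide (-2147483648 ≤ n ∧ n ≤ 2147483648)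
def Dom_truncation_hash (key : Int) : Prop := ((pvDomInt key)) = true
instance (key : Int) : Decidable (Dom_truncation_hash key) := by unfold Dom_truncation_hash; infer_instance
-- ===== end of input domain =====

-- B selects the kept positions by arithmetic strides (sorted union of range(2,n,3) and range(4,n,5))
-- instead of A's per-character counter scan with divisibility tests; same cost, different decomposition.

-- ===== PORT A =====
-- scan str(key) with a 1-based counter, appending chars whose position is divisible by 3 or 5
def truncation_hash (key : Int) : String :=
  let r := (PySem.Int.toChars key).foldl
    (fun (st : List Char × Int) ch =>
      (if PySem.Int.mod st.2 3 == 0 || PySem.Int.mod st.2 5 == 0 then st.1 ++ [ch] else st.1,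
       st.2 + 1))
    ([], 1)
  String.ofList r.1

-- ===== PORT B =====
-- sorted union of the two index strides, then join the chars at those indices
def truncation_hash_alt (key : Int) : String :=
  let s := PySem.Int.toChars key
  let n : Int := PySem.List.len s
  let idx := PySem.List.sorted
    (PySem.Set.union (PySem.Set.ofList (PySem.List.pyRange 2 n 3)) (PySem.List.pyRange 4 n 5))
    (fun x => x) false
  String.ofList (idx.map (fun i => PySem.List.pyGetD s i ' '))

-- ===== PRECONDITION & SPEC =====
def Spec_truncation_hash (key : Int) (out : String) : Prop := out = truncation_hash_alt key
instance (key : Int) (out : String) : Decidable (Spec_truncation_hash key out) := by unfold Spec_truncation_hash; infer_instance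

-- ===== CLAIM (what is proved, stated in full; the proofs are below) =====
def Claim_equal_truncation_hash : Prop := ∀ (key : Int), Dom_truncation_hash key → Spec_truncation_hash key (truncation_hash key)

-- ===== LEMMAS AND PROOFS =====

-- the characters of s kept when the first character has 1-based position c
def pvSel (s : List Char) (c : Int) : List Char :=
  match s with
  | [] => []
  | ch :: t => (if PySem.Int.mod c 3 == 0 || PySem.Int.mod c 5 == 0 then [ch] else []) ++ pvSel t (c + 1)

lemma pvScan_eq (s : List Char) : ∀ (acc : List Char) (c : Int),
    (s.foldl (fun (st : List Char × Int) ch =>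
      (if PySem.Int.mod st.2 3 == 0 || PySem.Int.mod st.2 5 == 0 then st.1 ++ [ch] else st.1,
       st.2 + 1)) (acc, c)).1 = acc ++ pvSel s c := by
  induction s with
  | nil => intro acc c; simp [pvSel]
  | cons ch t ih =>
    intro acc c
    simp only [List.foldl_cons, pvSel]
    split_ifs with h
    · rw [ih]; simp
    · rw [ih]; simp

lemma pvMapSel (s : List Char) : ∀ (c : Int),
    ((List.range s.length).filter
        (fun (k : Nat) => decide ((((k : Int) + c) % 3 = 0 ∨ ((k : Int) + c) % 5 = 0)))).map
      (fun (k : Nat) => s.getD k ' ') = pvSel s c := by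
  induction s with
  | nil => intro c; simp [pvSel]
  | cons ch t ih =>
    intro c
    simp only [List.length_cons]
    rw [List.range_succ_eq_map, List.filter_cons]
    have hf : ((fun (k : Nat) => decide ((((k : Int) + c) % 3 = 0 ∨ ((k : Int) + c) % 5 = 0))) ∘ Nat.succ)
        = (fun (k : Nat) => decide ((((k : Int) + (c + 1)) % 3 = 0 ∨ ((k : Int) + (c + 1)) % 5 = 0))) := by
      funext k
      have h : ((Nat.succ k : Nat) : Int) + c = (k : Int) + (c + 1) := by push_cast; ring
      simp only [Function.comp_apply, h]
    have hg : ((fun (k : Nat) => (ch :: t).getD k ' ') ∘ Nat.succ) = (fun (k : Nat) => t.getD k ' ') := by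
      funext k; simp [Function.comp]
    have hc : (PySem.Int.mod c 3 == 0 || PySem.Int.mod c 5 == 0) = decide ((((0:Nat) : Int) + c) % 3 = 0 ∨ (((0:Nat) : Int) + c) % 5 = 0) := by
      rw [Bool.eq_iff_iff]
      simp [PySem.Int.mod, Int.fmod_eq_emod]
    split_ifs with h0
    · rw [List.map_cons, List.filter_map, List.map_map, hf, hg, ih (c + 1)]
      simp only [pvSel, hc, h0, if_pos, List.getD_cons_zero]
      simp
    · rw [List.filter_map, List.map_map, hf, hg, ih (c + 1)]
      simp only [pvSel, hc, h0]
      simp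

lemma pvIdx_eq (n : Int) :
    PySem.List.sorted
      (PySem.Set.union (PySem.Set.ofList (PySem.List.pyRange 2 n 3))
        (PySem.List.pyRange 4 n 5)) (fun x => x) false
    = (PySem.List.pyRange 0 n 1).filter
        (fun i => decide (((i + 1) % 3 = 0 ∨ (i + 1) % 5 = 0))) := by
  apply PySem.List.sorted_eq_of_perm_of_pairwise_lt
  · rw [List.perm_ext_iff_of_nodup
      (List.Nodup.filter _ (PySem.List.nodup_pyRange_one 0 _))
      (PySem.Set.nodup_union _ _ (PySem.Set.nodup_ofList _))]
    intro x
    simp only [List.mem_filter, PySem.Set.mem_union, PySem.Set.mem_ofList,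
      PySem.List.mem_pyRange_iff_of_pos (show (0:Int) < 3 by norm_num),
      PySem.List.mem_pyRange_iff_of_pos (show (0:Int) < 5 by norm_num),
      PySem.List.mem_pyRange_one, decide_eq_true_eq]
    omega
  · exact List.Pairwise.filter _ (PySem.List.pairwise_lt_pyRange_one 0 _)

-- ===== VERDICT (by name: the statement is the Claim_ definition above) =====
theorem truncation_hash_spec : Claim_equal_truncation_hash := by
  intro key _
  show String.ofList ((PySem.Int.toChars key).foldl
      (fun (st : List Char × Int) ch =>
        (if PySem.Int.mod st.2 3 == 0 || PySem.Int.mod st.2 5 == 0 then st.1 ++ [ch] else st.1,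
         st.2 + 1)) ([], 1)).1
    = String.ofList ((PySem.List.sorted
        (PySem.Set.union (PySem.Set.ofList (PySem.List.pyRange 2 (PySem.List.len (PySem.Int.toChars key)) 3))
          (PySem.List.pyRange 4 (PySem.List.len (PySem.Int.toChars key)) 5))
        (fun x => x) false).map (fun i => PySem.List.pyGetD (PySem.Int.toChars key) i ' '))
  set s := PySem.Int.toChars key with hs
  rw [pvIdx_eq, pvScan_eq]
  simp only [List.nil_append]
  congr 1
  rw [← pvMapSel s 1]
  rw [PySem.List.pyRange_one, List.filter_map, List.map_map]
  simp only [PySem.List.len_eq, sub_zero, Int.toNat_natCast]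
  congr 1
  · funext k
    simp [Function.comp, PySem.List.pyGetD_natCast]
  · apply List.filter_congr
    intro k _
    simp [Function.comp]
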